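-- pv_equiv track=rewrite | github.com/focuzd/c_prog | .tutor/scripts/srs.py | consecutive_correct
-- ===== SOURCE A (Python) =====
-- def consecutive_correct(score_history):
--     """Count consecutive scores >= 4 from the end of history."""
--     count = 0
--     for score in reversed(score_history):
--         if score >= 4:
--             count += 1
--         else:
--             break
--     return count
-- ===== SOURCE B (Python) =====
-- def consecutive_correct(score_history):
--     """Count consecutive scores >= 4 from the end of history (single forward pass)."""
--     count = 0
--     for score in score_history:
--         count = count + 1 if score >= 4 else 0
--     return count
-- ===== Notes on version B (the rewrite author's own statement) =====
-- stated objective: alternative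
-- what changed: Forward single pass with a reset-on-failure counter replaces the reversed traversal with early break.
import Mathlib
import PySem

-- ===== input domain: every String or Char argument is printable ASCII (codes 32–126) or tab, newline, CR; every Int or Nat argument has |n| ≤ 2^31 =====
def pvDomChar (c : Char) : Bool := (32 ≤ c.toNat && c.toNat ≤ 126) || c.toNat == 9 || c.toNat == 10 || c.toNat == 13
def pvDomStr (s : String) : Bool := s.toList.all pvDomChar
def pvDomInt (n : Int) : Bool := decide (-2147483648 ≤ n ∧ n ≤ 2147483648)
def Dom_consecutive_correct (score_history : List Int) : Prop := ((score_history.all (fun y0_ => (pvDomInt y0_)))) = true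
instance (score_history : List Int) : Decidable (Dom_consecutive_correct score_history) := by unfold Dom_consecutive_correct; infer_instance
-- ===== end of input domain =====

-- B replaces A's reversed traversal with early break by a single forward pass with a reset-on-failure counter (alternative decomposition, not faster).

-- ===== PORT A =====
-- A-side helper: loop over reversed list, break on first score < 4
def pvLoopA : List Int → Int
  | [] => 0
  | s :: rest => if s ≥ 4 then 1 + pvLoopA rest else 0

def consecutive_correct (score_history : List Int) : Int :=
  pvLoopA score_history.reverse

-- ===== PORT B =====
def consecutive_correct_alt (score_history : List Int) : Int :=
  score_history.foldl (fun count score => if score ≥ 4 then count + 1 else 0) 0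

-- ===== PRECONDITION & SPEC =====
def Spec_consecutive_correct (score_history : List Int) (out : Int) : Prop := out = consecutive_correct_alt score_history
instance (score_history : List Int) (out : Int) : Decidable (Spec_consecutive_correct score_history out) := by unfold Spec_consecutive_correct; infer_instance

-- ===== CLAIM (what is proved, stated in full; the proofs are below) =====
def Claim_equal_consecutive_correct : Prop := ∀ (score_history : List Int), Dom_consecutive_correct score_history → Spec_consecutive_correct score_history (consecutive_correct score_history)

-- ===== LEMMAS AND PROOFS =====

-- ===== VERDICT (by name: the statement is the Claim_ definition above) =====
theorem foldl_reset_eq_loopA (xs : List Int) (c : Int) :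
    xs.foldl (fun count score => if score ≥ 4 then count + 1 else 0) c =
      (if xs.all (fun s => decide (s ≥ 4)) then c + pvLoopA xs.reverse
       else pvLoopA xs.reverse) := by
  induction xs using List.reverseRecOn generalizing c with
  | nil => simp [pvLoopA]
  | append_singleton xs s ih =>
    simp only [List.foldl_append, List.foldl_cons, List.foldl_nil, List.reverse_append,
      List.reverse_cons, List.reverse_nil, List.nil_append, List.cons_append,
      List.all_append, List.all_cons, List.all_nil, pvLoopA]
    by_cases hs : s ≥ 4
    · simp only [hs, if_pos, decide_true, Bool.and_true, ih c]
      split_ifs with h1 <;> simp_all <;> omega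
    · simp [hs]

theorem consecutive_correct_spec : Claim_equal_consecutive_correct := by
  intro xs _
  unfold Spec_consecutive_correct consecutive_correct consecutive_correct_alt
  rw [foldl_reset_eq_loopA]
  split_ifs <;> omega
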